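-- pv_equiv track=rewrite | github.com/e-app-404/omega_registry | scripts/analytics/analyze_omega_registry.py | compute_field_overlap_matrix
-- ===== SOURCE A (Python) =====
-- import itertools  # Added for field overlap analytics
--
-- def compute_field_overlap_matrix(data, fields=None):
--     """Compute overlap matrix: for each pair of fields, count entities where both are populated."""
--     if not data:
--         return {}
--     if fields is None:
--         # Use all fields present in any entity
--         fields = set()
--         for entity in data:
--             fields.update(entity.keys())
--         fields = sorted(fields)
--     overlap = {f1: {f2: 0 for f2 in fields} for f1 in fields}
--     for entity in data:
--         present = {f for f in fields if entity.get(f) not in (None, "", [], {})}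
--         for f1, f2 in itertools.product(present, repeat=2):
--             overlap[f1][f2] += 1
--     return overlap
-- ===== SOURCE B (Python) =====
-- def compute_field_overlap_matrix(data, fields=None):
--     """Compute overlap matrix: for each pair of fields, count entities where both are populated."""
--     if not data:
--         return {}
--     if fields is None:
--         fields = sorted({f for entity in data for f in entity})
--     keys = list(dict.fromkeys(fields))  # distinct fields, first-occurrence order
--     # One boolean presence column per field, then each cell is a dot product of two columns.
--     cols = [[entity.get(f) not in (None, "", [], {}) for entity in data] for f in keys]
--     return {f1: {f2: sum(x and y for x, y in zip(c1, c2)) for f2, c2 in zip(keys, cols)}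
--             for f1, c1 in zip(keys, cols)}
-- ===== Notes on version B (the rewrite author's own statement) =====
-- stated objective: alternative
-- what changed: Instead of A's nested dict of counters incremented per entity over the product of its present-field set, B builds one boolean presence column per field and fills each matrix cell as the dot product (sum of pairwise AND) of two columns, constructing the result dict directly by comprehension.
import Mathlib
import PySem

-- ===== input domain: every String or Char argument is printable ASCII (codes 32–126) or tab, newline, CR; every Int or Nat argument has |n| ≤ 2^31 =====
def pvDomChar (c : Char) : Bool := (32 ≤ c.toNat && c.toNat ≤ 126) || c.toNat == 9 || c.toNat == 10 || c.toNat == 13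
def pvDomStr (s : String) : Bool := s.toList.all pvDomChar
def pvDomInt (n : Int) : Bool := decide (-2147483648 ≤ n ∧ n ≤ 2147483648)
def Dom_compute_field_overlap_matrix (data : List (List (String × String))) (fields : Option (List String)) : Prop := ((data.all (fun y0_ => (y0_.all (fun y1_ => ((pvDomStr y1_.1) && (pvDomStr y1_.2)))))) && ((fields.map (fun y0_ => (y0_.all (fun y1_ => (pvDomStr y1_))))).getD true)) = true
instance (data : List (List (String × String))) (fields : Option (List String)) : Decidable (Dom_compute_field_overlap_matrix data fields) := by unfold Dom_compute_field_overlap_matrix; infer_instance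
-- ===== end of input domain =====

-- B replaces A's per-entity double loop over the present-field set (incrementing nested dict
-- counters) by one boolean presence column per field, each matrix cell being the dot product
-- of two columns; same cost class, alternative algorithm; equality of return values proved below.

-- ===== PORT A =====
-- entity.get(f) not in (None, "", [], {}): a str value can only equal "" among those
def pvPopA (e : List (String × String)) (f : String) : Bool :=
  match (PySem.Dict.mk e).get? f with
  | none => false
  | some v => !(v == "")

-- the 'if fields is None' block: collect all keys into a set, then sorted(...)
def pvFieldsA (data : List (List (String × String))) (fields : Option (List String)) : List String :=
  match fields with
  | some fs => fs
  | none =>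
      PySem.List.sorted
        (data.foldl (fun s e => PySem.Set.update s (PySem.Dict.mk e).keys) PySem.Set.empty)
        (fun x => x) false

-- 'for f1, f2 in itertools.product(present, repeat=2): overlap[f1][f2] += 1'
-- (f1, f2 ∈ present ⊆ fields = existing keys, so Python's overlap[f1][f2] never raises;
--  modify's defaults are therefore never used)
def pvEntityStep (fs : List String) (ov : PySem.Dict String (PySem.Dict String Int))
    (e : List (String × String)) : PySem.Dict String (PySem.Dict String Int) :=
  let present : PySem.Set String := PySem.Set.ofList (fs.filter (fun f => pvPopA e f))
  List.foldl (fun ov1 f1 =>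
    List.foldl (fun ov2 f2 =>
      ov2.modify f1 PySem.Dict.empty (fun inn => inn.modify f2 0 (· + 1))) ov1 present)
    ov present

def compute_field_overlap_matrix (data : List (List (String × String))) (fields : Option (List String)) : List (String × List (String × Int)) :=
  if data = [] then []
  else
    let fs := pvFieldsA data fields
    -- overlap = {f1: {f2: 0 for f2 in fields} for f1 in fields}
    let inner0 : PySem.Dict String Int := fs.foldl (fun d f2 => d.insert f2 0) PySem.Dict.empty
    let overlap0 : PySem.Dict String (PySem.Dict String Int) :=
      fs.foldl (fun d f1 => d.insert f1 inner0) PySem.Dict.empty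
    let final := data.foldl (pvEntityStep fs) overlap0
    final.items.map (fun p => (p.1, p.2.items))

-- ===== PORT B =====
-- B's emptiness test 'entity.get(f) not in (None, "", [], {})': with str values this is
-- exactly 'get with default "" differs from ""' (None ↦ "" and "" ↦ "" both fail; [] / {}
-- never equal a str) — exact on the String-valued domain
def pvPopB (e : List (String × String)) (f : String) : Bool :=
  (((PySem.Dict.mk e).get? f).getD "") != ""

-- sum(x and y for x, y in zip(c1, c2)): booleans summed as 0/1
def pvSumAnd (c1 c2 : List Bool) : Int :=
  (List.zipWith (fun x y => x && y) c1 c2).foldl (fun s b => s + (if b then 1 else 0)) 0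

-- keys = list(dict.fromkeys(fields)) is duplicate-free, so the two dict comprehensions
-- keyed by keys are plain maps in key order (exact)
def compute_field_overlap_matrix_alt (data : List (List (String × String))) (fields : Option (List String)) : List (String × List (String × Int)) :=
  if data = [] then []
  else
    let fs : List String :=
      match fields with
      | some fs => fs
      | none =>
          -- sorted({f for entity in data for f in entity})
          PySem.List.sorted
            (PySem.Set.ofList (data.flatMap (fun e => (PySem.Dict.mk e).keys)))
            (fun x => x) false
    let keys := PySem.List.dedup fs
    -- cols = [[entity.get(f) not in (None, "", [], {}) for entity in data] for f in keys]
    let cols := keys.map (fun f => data.map (fun e => pvPopB e f))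
    (keys.zip cols).map (fun p1 =>
      (p1.1, (keys.zip cols).map (fun p2 => (p2.1, pvSumAnd p1.2 p2.2))))

-- ===== PRECONDITION & SPEC =====
def Spec_compute_field_overlap_matrix (data : List (List (String × String))) (fields : Option (List String)) (out : List (String × List (String × Int))) : Prop := out = compute_field_overlap_matrix_alt data fields
instance (data : List (List (String × String))) (fields : Option (List String)) (out : List (String × List (String × Int))) : Decidable (Spec_compute_field_overlap_matrix data fields out) := by unfold Spec_compute_field_overlap_matrix; infer_instance

-- ===== CLAIM (what is proved, stated in full; the proofs are below) =====
def Claim_equal_compute_field_overlap_matrix : Prop := ∀ (data : List (List (String × String))) (fields : Option (List String)), Dom_compute_field_overlap_matrix data fields → Spec_compute_field_overlap_matrix data fields (compute_field_overlap_matrix data fields)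

-- ===== LEMMAS AND PROOFS =====

-- value of a dict built by inserting value (v f) for every f in fs (later duplicates
-- overwrite with the same value, since v depends on the key only)
theorem pv_getD_foldl_insert_fun {ν : Type} (v : String → ν) (fs : List String)
    (d : PySem.Dict String ν) (k : String) (dflt : ν) :
    (fs.foldl (fun d f => d.insert f (v f)) d).getD k dflt
      = if k ∈ fs then v k else d.getD k dflt := by
  induction fs generalizing d with
  | nil => simp
  | cons f fs ih =>
      simp only [List.foldl_cons, ih, PySem.Dict.getD_insert, List.mem_cons]
      by_cases h1 : k ∈ fs <;> by_cases h2 : k = f <;> simp [h1, h2]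

-- A's inner increment loop adds (ps2.count g2) to row f1
theorem pv_inner_fold (ps2 : List String) (f1 : String)
    (ov : PySem.Dict String (PySem.Dict String Int)) (g1 g2 : String) :
    ((ps2.foldl (fun ov2 f2 => ov2.modify f1 PySem.Dict.empty (fun inn => inn.modify f2 0 (· + 1))) ov).getD g1 PySem.Dict.empty).getD g2 0
      = (ov.getD g1 PySem.Dict.empty).getD g2 0 + (if g1 = f1 then (ps2.count g2 : Int) else 0) := by
  induction ps2 generalizing ov with
  | nil => simp
  | cons f2 rest ih =>
      simp only [List.foldl_cons, ih, PySem.Dict.getD_modify]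
      by_cases h1 : g1 = f1
      · subst h1
        simp only [List.count_cons]
        by_cases h2 : g2 = f2
        · subst h2; simp; ring
        · have hne : ¬ f2 = g2 := fun hc => h2 hc.symm
          simp [PySem.Dict.getD_modify, h2, hne]
      · simp [h1]

-- A's double loop adds (ps1.count g1) * (ps.count g2)
theorem pv_outer_fold (ps1 ps : List String)
    (ov : PySem.Dict String (PySem.Dict String Int)) (g1 g2 : String) :
    ((ps1.foldl (fun ov1 f1 => ps.foldl (fun ov2 f2 => ov2.modify f1 PySem.Dict.empty (fun inn => inn.modify f2 0 (· + 1))) ov1) ov).getD g1 PySem.Dict.empty).getD g2 0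
      = (ov.getD g1 PySem.Dict.empty).getD g2 0 + (ps1.count g1 : Int) * (ps.count g2 : Int) := by
  induction ps1 generalizing ov with
  | nil => simp
  | cons f1 rest ih =>
      simp only [List.foldl_cons, ih, pv_inner_fold, List.count_cons]
      by_cases h1 : g1 = f1
      · subst h1; simp; ring
      · simp [h1, Ne.symm h1]

-- the entity step adds 1 to cell (g1,g2) iff both fields are present
theorem pv_entityStep_cell (fs : List String) (e : List (String × String))
    (ov : PySem.Dict String (PySem.Dict String Int)) (g1 g2 : String)
    (h1 : g1 ∈ fs) (h2 : g2 ∈ fs) :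
    ((pvEntityStep fs ov e).getD g1 PySem.Dict.empty).getD g2 0
      = (ov.getD g1 PySem.Dict.empty).getD g2 0 + (if pvPopA e g1 && pvPopA e g2 then 1 else 0) := by
  unfold pvEntityStep
  rw [pv_outer_fold]
  congr 1
  have hnd := PySem.Set.nodup_ofList (fs.filter (fun f => pvPopA e f))
  have hmem : ∀ g, g ∈ fs → (g ∈ PySem.Set.ofList (fs.filter (fun f => pvPopA e f)) ↔ pvPopA e g = true) := by
    intro g hg
    rw [PySem.Set.mem_ofList, List.mem_filter]
    simp [hg]
  have hc : ∀ g, g ∈ fs → ((PySem.Set.ofList (fs.filter (fun f => pvPopA e f)) : List String).count g : Int)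
      = (if pvPopA e g then 1 else 0) := by
    intro g hg
    by_cases h : pvPopA e g = true
    · rw [List.count_eq_one_of_mem hnd ((hmem g hg).2 h)]; simp [h]
    · rw [List.count_eq_zero_of_not_mem (fun hc => h ((hmem g hg).1 hc))]
      simp only [Bool.not_eq_true] at h; simp [h]
  rw [hc g1 h1, hc g2 h2]
  by_cases p1 : pvPopA e g1 = true <;> by_cases p2 : pvPopA e g2 = true <;> simp [p1, p2]

-- cell value after folding the whole data list
theorem pv_data_fold_cell (fs : List String) (ds : List (List (String × String)))
    (ov : PySem.Dict String (PySem.Dict String Int)) (g1 g2 : String)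
    (h1 : g1 ∈ fs) (h2 : g2 ∈ fs) :
    ((ds.foldl (pvEntityStep fs) ov).getD g1 PySem.Dict.empty).getD g2 0
      = (ov.getD g1 PySem.Dict.empty).getD g2 0 + ((ds.countP (fun e => pvPopA e g1 && pvPopA e g2) : Nat) : Int) := by
  induction ds generalizing ov with
  | nil => simp
  | cons e rest ih =>
      simp only [List.foldl_cons, ih, pv_entityStep_cell fs e ov g1 g2 h1 h2, List.countP_cons]
      by_cases h : (pvPopA e g1 && pvPopA e g2) = true
      · simp [h]
        ring
      · simp [h]

-- keys are preserved by the entity step (all touched keys already exist)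
theorem pv_keys_modify_mem {κ ν : Type} [BEq κ] [LawfulBEq κ]
    (d : PySem.Dict κ ν) (k : κ) (d0 : ν) (f : ν → ν) (h : k ∈ d.keys) :
    (d.modify k d0 f).keys = d.keys := by
  rw [PySem.Dict.keys_modify]
  exact PySem.Dict.keys_insert_of_contains d _ ((PySem.Dict.contains_iff_mem_keys d k).2 h)

-- the structural invariant: outer keys = S and every row has keys = S
def pvInv (S : List String) (ov : PySem.Dict String (PySem.Dict String Int)) : Prop :=
  ov.keys = S ∧ ∀ g ∈ S, (ov.getD g PySem.Dict.empty).keys = S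

theorem pv_inv_modify (S : List String) (ov : PySem.Dict String (PySem.Dict String Int))
    (f1 f2 : String) (hf1 : f1 ∈ S) (hf2 : f2 ∈ S) (h : pvInv S ov) :
    pvInv S (ov.modify f1 PySem.Dict.empty (fun inn => inn.modify f2 0 (· + 1))) := by
  obtain ⟨hk, hr⟩ := h
  constructor
  · rw [pv_keys_modify_mem _ _ _ _ (by rw [hk]; exact hf1)]; exact hk
  · intro g hg
    rw [PySem.Dict.getD_modify]
    by_cases hgf : g = f1
    · subst hgf
      rw [if_pos rfl, pv_keys_modify_mem _ _ _ _ (by rw [hr g hg]; exact hf2)]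
      exact hr g hg
    · simp only [if_neg hgf]; exact hr g hg

theorem pv_inv_inner_fold (S : List String) (ps2 : List String) (f1 : String)
    (ov : PySem.Dict String (PySem.Dict String Int))
    (hf1 : f1 ∈ S) (hsub : ∀ f ∈ ps2, f ∈ S) (h : pvInv S ov) :
    pvInv S (ps2.foldl (fun ov2 f2 => ov2.modify f1 PySem.Dict.empty (fun inn => inn.modify f2 0 (· + 1))) ov) := by
  induction ps2 generalizing ov with
  | nil => exact h
  | cons f2 rest ih =>
      simp only [List.foldl_cons]
      exact ih _ (fun f hf => hsub f (by simp [hf]))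
        (pv_inv_modify S ov f1 f2 hf1 (hsub f2 (by simp)) h)

theorem pv_inv_outer_fold (S : List String) (ps1 ps : List String)
    (ov : PySem.Dict String (PySem.Dict String Int))
    (hsub1 : ∀ f ∈ ps1, f ∈ S) (hsub : ∀ f ∈ ps, f ∈ S) (h : pvInv S ov) :
    pvInv S (ps1.foldl (fun ov1 f1 => ps.foldl (fun ov2 f2 => ov2.modify f1 PySem.Dict.empty (fun inn => inn.modify f2 0 (· + 1))) ov1) ov) := by
  induction ps1 generalizing ov with
  | nil => exact h
  | cons f1 rest ih =>
      simp only [List.foldl_cons]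
      exact ih _ (fun f hf => hsub1 f (by simp [hf]))
        (pv_inv_inner_fold S ps f1 ov (hsub1 f1 (by simp)) hsub h)

theorem pv_inv_entityStep (S : List String) (fs : List String) (e : List (String × String))
    (ov : PySem.Dict String (PySem.Dict String Int))
    (hsub : ∀ f ∈ fs, f ∈ S) (h : pvInv S ov) :
    pvInv S (pvEntityStep fs ov e) := by
  unfold pvEntityStep
  have hpres : ∀ f ∈ (PySem.Set.ofList (fs.filter (fun f => pvPopA e f)) : List String), f ∈ S :=
    fun f hf => hsub f (List.mem_filter.1 ((PySem.Set.mem_ofList _ f).1 hf)).1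
  exact pv_inv_outer_fold S _ _ ov hpres hpres h

theorem pv_inv_data_fold (S : List String) (fs : List String) (ds : List (List (String × String)))
    (ov : PySem.Dict String (PySem.Dict String Int))
    (hsub : ∀ f ∈ fs, f ∈ S) (h : pvInv S ov) :
    pvInv S (ds.foldl (pvEntityStep fs) ov) := by
  induction ds generalizing ov with
  | nil => exact h
  | cons e rest ih => exact ih _ (pv_inv_entityStep S fs e ov hsub h)

-- keys of a dict built by inserting over fs
theorem pv_keys_foldl_insert_fun {ν : Type} (v : String → ν) (fs : List String) :
    (fs.foldl (fun d f => d.insert f (v f)) (PySem.Dict.empty : PySem.Dict String ν)).keys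
      = PySem.Set.ofList fs := by
  have := PySem.Dict.keys_foldl_insert fs (fun _ f => v f) (PySem.Dict.empty : PySem.Dict String ν)
  simpa [PySem.Dict.keys_empty, PySem.Set.update_nil_left] using this

-- A's fields-set loop equals B's flattened set comprehension
theorem pv_fields_set (data : List (List (String × String))) :
    data.foldl (fun s e => PySem.Set.update s (PySem.Dict.mk e).keys) PySem.Set.empty
      = PySem.Set.ofList (data.flatMap (fun e => (PySem.Dict.mk e).keys)) := by
  have h : ∀ (ds : List (List (String × String))) (s : PySem.Set String),
      ds.foldl (fun s e => PySem.Set.update s (PySem.Dict.mk e).keys) s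
        = PySem.Set.update s (ds.flatMap (fun e => (PySem.Dict.mk e).keys)) := by
    intro ds
    induction ds with
    | nil => intro s; simp [PySem.Set.update]
    | cons e rest ih =>
        intro s
        rw [List.foldl_cons, ih, List.flatMap_cons]
        simp [PySem.Set.update, List.foldl_append]
  rw [h]
  rfl

-- the two emptiness tests agree
theorem pv_pop_eq (e : List (String × String)) (f : String) : pvPopB e f = pvPopA e f := by
  unfold pvPopA pvPopB
  cases h : (PySem.Dict.mk e).get? f <;> simp [bne]

-- mapping over l zipped with a map of itself
theorem pv_zip_map_map {α β γ : Type} (l : List α) (g : α → β) (h : α × β → γ) :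
    (l.zip (l.map g)).map h = l.map (fun x => h (x, g x)) := by
  induction l with
  | nil => rfl
  | cons a t ih => simp [ih]

-- summing booleans with an accumulator counts the trues
theorem pv_foldl_bool_sum (l : List Bool) (s : Int) :
    l.foldl (fun s b => s + (if b then 1 else 0)) s = s + ((l.countP id : Nat) : Int) := by
  induction l generalizing s with
  | nil => simp
  | cons b t ih =>
      simp only [List.foldl_cons, List.countP_cons, ih]
      by_cases hb : b = true
      · simp [hb]; ring
      · simp [hb]

-- B's dot product of two presence columns is the pair count
theorem pv_sumAnd_count (ds : List (List (String × String))) (f1 f2 : String) :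
    pvSumAnd (ds.map (fun e => pvPopB e f1)) (ds.map (fun e => pvPopB e f2))
      = ((ds.countP (fun e => pvPopA e f1 && pvPopA e f2) : Nat) : Int) := by
  unfold pvSumAnd
  have hz : List.zipWith (fun x y => x && y) (ds.map (fun e => pvPopB e f1)) (ds.map (fun e => pvPopB e f2))
      = ds.map (fun e => pvPopA e f1 && pvPopA e f2) := by
    induction ds with
    | nil => rfl
    | cons e t ih => simp [pv_pop_eq]
  rw [hz, pv_foldl_bool_sum]
  have := List.countP_map (p := fun b => id b) (f := fun e => pvPopA e f1 && pvPopA e f2) (l := ds)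
  simp only [id] at this
  simp

-- ===== VERDICT (by name: the statement is the Claim_ definition above) =====
theorem compute_field_overlap_matrix_spec : Claim_equal_compute_field_overlap_matrix := by
  intro data fields hdom
  clear hdom
  unfold Spec_compute_field_overlap_matrix compute_field_overlap_matrix compute_field_overlap_matrix_alt
  by_cases hd : data = []
  · simp [hd]
  · simp only [if_neg hd]
    have hfsB :
        (match fields with
         | some fs => fs
         | none => PySem.List.sorted
             (PySem.Set.ofList (data.flatMap (fun e => (PySem.Dict.mk e).keys)))
             (fun x => x) false) = pvFieldsA data fields := by
      cases fields with
      | some fs => rfl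
      | none => unfold pvFieldsA; rw [pv_fields_set]
    rw [hfsB]
    set fs := pvFieldsA data fields with hfs
    set S : List String := PySem.Set.ofList fs with hS
    have hndS : S.Nodup := PySem.Set.nodup_ofList fs
    have hmemS : ∀ g, g ∈ S ↔ g ∈ fs := fun g => PySem.Set.mem_ofList fs g
    -- A's side: items = the matrix of pair counts over S
    set inner0 : PySem.Dict String Int := fs.foldl (fun d f2 => d.insert f2 0) PySem.Dict.empty with hinner0
    set overlap0 : PySem.Dict String (PySem.Dict String Int) :=
      fs.foldl (fun d f1 => d.insert f1 inner0) PySem.Dict.empty with hoverlap0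
    have hinner0_keys : inner0.keys = S := pv_keys_foldl_insert_fun (fun _ => (0 : Int)) fs
    have hinv0 : pvInv S overlap0 := by
      constructor
      · exact pv_keys_foldl_insert_fun (fun _ => inner0) fs
      · intro g hg
        rw [hoverlap0, pv_getD_foldl_insert_fun (fun _ => inner0) fs _ g _, if_pos ((hmemS g).1 hg)]
        exact hinner0_keys
    set finalA := data.foldl (pvEntityStep fs) overlap0 with hfinalA
    have hinvF : pvInv S finalA :=
      pv_inv_data_fold S fs data overlap0 (fun f hf => (hmemS f).2 hf) hinv0
    have hcellA : ∀ g1 ∈ S, ∀ g2 ∈ S,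
        ((finalA.getD g1 PySem.Dict.empty).getD g2 0)
          = ((data.countP (fun e => pvPopA e g1 && pvPopA e g2) : Nat) : Int) := by
      intro g1 hg1 g2 hg2
      rw [hfinalA, pv_data_fold_cell fs data overlap0 g1 g2 ((hmemS g1).1 hg1) ((hmemS g2).1 hg2)]
      have h0 : (overlap0.getD g1 PySem.Dict.empty).getD g2 0 = 0 := by
        rw [hoverlap0, pv_getD_foldl_insert_fun (fun _ => inner0) fs _ g1 _, if_pos ((hmemS g1).1 hg1),
            hinner0, pv_getD_foldl_insert_fun (fun _ => (0 : Int)) fs _ g2 0]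
        simp
      rw [h0, zero_add]
    have hitemsA : finalA.items.map (fun p => (p.1, p.2.items))
        = S.map (fun g1 => (g1, S.map (fun g2 => (g2, ((data.countP (fun e => pvPopA e g1 && pvPopA e g2) : Nat) : Int))))) := by
      obtain ⟨hkF, hrF⟩ := hinvF
      rw [PySem.Dict.items_eq_map_keys finalA (by rw [hkF]; exact hndS) PySem.Dict.empty, hkF,
          List.map_map]
      apply List.map_congr_left
      intro g1 hg1
      simp only [Function.comp]
      congr 1
      rw [PySem.Dict.items_eq_map_keys _ (by rw [hrF g1 hg1]; exact hndS) (0 : Int), hrF g1 hg1]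
      apply List.map_congr_left
      intro g2 hg2
      rw [hcellA g1 hg1 g2 hg2]
    -- B's side: the zipped comprehension is the same matrix
    have hkeys : PySem.List.dedup fs = S := by rw [hS]; exact PySem.List.dedup_eq_ofList fs
    have hitemsB :
        ((PySem.List.dedup fs).zip ((PySem.List.dedup fs).map (fun f => data.map (fun e => pvPopB e f)))).map (fun p1 =>
          (p1.1, ((PySem.List.dedup fs).zip ((PySem.List.dedup fs).map (fun f => data.map (fun e => pvPopB e f)))).map
            (fun p2 => (p2.1, pvSumAnd p1.2 p2.2))))
        = S.map (fun g1 => (g1, S.map (fun g2 => (g2, ((data.countP (fun e => pvPopA e g1 && pvPopA e g2) : Nat) : Int))))) := by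
      rw [hkeys, pv_zip_map_map]
      apply List.map_congr_left
      intro g1 _
      congr 1
      rw [pv_zip_map_map]
      apply List.map_congr_left
      intro g2 _
      rw [pv_sumAnd_count]
    exact hitemsA.trans hitemsB.symm
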